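-- pv_equiv track=rewrite | github.com/omniscale/imposm2 | imposm/cache/nodes.py | zip_nodes
-- ===== SOURCE A (Python) =====
-- from itertools import izip
--
-- def zip_nodes(ids, lons, lats):
--     nodes = []
--     last_id = last_lon = last_lat = 0
--     for id, lon, lat in izip(ids, lons, lats):
--         last_id += id
--         last_lon += lon
--         last_lat += lat
--
--         nodes.append((
--             last_id,
--             last_lon,
--             last_lat
--         ))
--     return nodes
-- ===== SOURCE B (Python) =====
-- def zip_nodes(ids, lons, lats):
--     return _scan(list(zip(ids, lons, lats)))
--
-- def _scan(ts):
--     # divide-and-conquer prefix scan: scan each half, shift the right half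
--     # by the left half's total (its last prefix sum)
--     if len(ts) <= 1:
--         return list(ts)
--     m = len(ts) // 2
--     left = _scan(ts[:m])
--     right = _scan(ts[m:])
--     a, b, c = left[-1]
--     return left + [(a + x, b + y, c + z) for (x, y, z) in right]
-- ===== Notes on version B (the rewrite author's own statement) =====
-- stated objective: alternative
-- what changed: Replaces the fused single-pass loop with three running-sum accumulators by a divide-and-conquer prefix scan over zipped triples: scan each half recursively and shift the right half's results by the left half's total.
import Mathlib
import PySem

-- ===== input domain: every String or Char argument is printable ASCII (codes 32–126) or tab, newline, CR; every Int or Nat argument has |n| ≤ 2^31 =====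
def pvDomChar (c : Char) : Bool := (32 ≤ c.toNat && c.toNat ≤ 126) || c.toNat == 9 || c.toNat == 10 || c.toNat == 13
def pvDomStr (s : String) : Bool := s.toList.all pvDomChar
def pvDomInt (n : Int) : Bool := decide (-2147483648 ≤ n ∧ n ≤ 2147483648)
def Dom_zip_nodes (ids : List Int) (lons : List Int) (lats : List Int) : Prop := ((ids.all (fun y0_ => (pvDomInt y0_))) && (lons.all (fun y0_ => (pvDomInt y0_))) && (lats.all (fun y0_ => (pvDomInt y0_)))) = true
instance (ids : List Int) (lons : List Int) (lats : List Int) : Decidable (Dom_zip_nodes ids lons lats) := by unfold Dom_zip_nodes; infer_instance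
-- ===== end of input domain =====

-- B replaces A's fused three-accumulator loop by a divide-and-conquer prefix scan over zipped triples (scan each half, shift the right half by the left half's total); alternative algorithm, same results.


-- ===== PORT A =====
-- loop of A: fold over izip(ids, lons, lats) carrying the three running sums and the nodes list
def zipNodesLoop : List (Int × Int × Int) → Int → Int → Int → List (Int × Int × Int) → List (Int × Int × Int)
  | [], _, _, _, nodes => nodes
  | (id, lon, lat) :: rest, lastId, lastLon, lastLat, nodes =>
      zipNodesLoop rest (lastId + id) (lastLon + lon) (lastLat + lat)
        (nodes ++ [(lastId + id, lastLon + lon, lastLat + lat)])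

def zip_nodes (ids : List Int) (lons : List Int) (lats : List Int) : List (Int × Int × Int) :=
  zipNodesLoop (ids.zip (lons.zip lats)) 0 0 0 []

-- ===== PORT B =====
-- _scan of Source B: divide-and-conquer prefix scan; the left half's last element is its total,
-- added to every element of the scanned right half.  The fuel argument (= initial length) and
-- the getD 0 for Python's left[-1] are only totality guards: fuel never runs out, and the left
-- half is never empty in the recursive branch.
def dcScan : Nat → List (Int × Int × Int) → List (Int × Int × Int)
  | _, [] => []
  | _, [t] => [t]
  | 0, _ :: _ :: _ => []
  | fuel + 1, a :: b :: rest =>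
      let m := (a :: b :: rest).length / 2
      let left := dcScan fuel ((a :: b :: rest).take m)
      let right := dcScan fuel ((a :: b :: rest).drop m)
      left ++ right.map (fun t => left.getLast?.getD 0 + t)

def zip_nodes_alt (ids : List Int) (lons : List Int) (lats : List Int) : List (Int × Int × Int) :=
  dcScan (ids.zip (lons.zip lats)).length (ids.zip (lons.zip lats))

-- ===== PRECONDITION & SPEC =====
def Spec_zip_nodes (ids : List Int) (lons : List Int) (lats : List Int) (out : List (Int × Int × Int)) : Prop := out = zip_nodes_alt ids lons lats
instance (ids : List Int) (lons : List Int) (lats : List Int) (out : List (Int × Int × Int)) : Decidable (Spec_zip_nodes ids lons lats out) := by unfold Spec_zip_nodes; infer_instance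

-- ===== CLAIM (what is proved, stated in full; the proofs are below) =====
def Claim_equal_zip_nodes : Prop := ∀ (ids : List Int) (lons : List Int) (lats : List Int), Dom_zip_nodes ids lons lats → Spec_zip_nodes ids lons lats (zip_nodes ids lons lats)

-- ===== LEMMAS AND PROOFS =====
-- reference semantics: componentwise running prefix sums of triples starting at s
def accT (s : Int × Int × Int) : List (Int × Int × Int) → List (Int × Int × Int)
  | [] => []
  | t :: ts => (s + t) :: accT (s + t) ts

theorem accT_shift (l : List (Int × Int × Int)) :
    ∀ s, accT s l = (accT 0 l).map (fun t => s + t) := by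
  induction l with
  | nil => intro s; simp [accT]
  | cons t ts ih =>
    intro s
    simp only [accT, List.map_cons, zero_add]
    congr 1
    rw [ih (s + t), ih t, List.map_map]
    congr 1
    funext x
    simp [add_assoc]

theorem accT_append (l₁ l₂ : List (Int × Int × Int)) :
    ∀ s, accT s (l₁ ++ l₂) = accT s l₁ ++ accT (s + l₁.sum) l₂ := by
  induction l₁ with
  | nil => intro s; simp [accT]
  | cons t ts ih => intro s; simp [accT, ih, add_assoc]

theorem accT_getLast? (l : List (Int × Int × Int)) :
    ∀ s, l ≠ [] → (accT s l).getLast? = some (s + l.sum) := by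
  induction l with
  | nil => intro s h; exact absurd rfl h
  | cons t ts ih =>
    intro s _
    cases ts with
    | nil => simp [accT]
    | cons u us =>
      have h2 := ih (s + t) (by simp)
      simp only [accT] at h2 ⊢
      rw [List.getLast?_cons_cons, h2]
      simp [add_assoc]

theorem dcScan_eq (fuel : Nat) : ∀ (l : List (Int × Int × Int)), l.length ≤ fuel → dcScan fuel l = accT 0 l := by
  induction fuel with
  | zero =>
    intro l hl
    match l with
    | [] => simp [dcScan, accT]
    | [t] => simp at hl
    | a :: b :: rest => simp at hl
  | succ fuel ih =>
    intro l hl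
    match l with
    | [] => simp [dcScan, accT]
    | [t] => simp [dcScan, accT]
    | a :: b :: rest =>
      have hm1 : 1 ≤ (a :: b :: rest).length / 2 := by simp; omega
      have hmlt : (a :: b :: rest).length / 2 < (a :: b :: rest).length := by simp; omega
      have hne : List.take ((a :: b :: rest).length / 2) (a :: b :: rest) ≠ [] := by
        cases hm : (a :: b :: rest).length / 2 with
        | zero => omega
        | succ k => simp
      rw [dcScan]
      rw [ih _ (by simp only [List.length_take]; omega),
          ih _ (by simp only [List.length_drop] at *; omega)]
      rw [accT_getLast? _ 0 hne]
      simp only [Option.getD_some, zero_add]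
      rw [← accT_shift]
      conv_rhs => rw [← List.take_append_drop ((a :: b :: rest).length / 2) (a :: b :: rest)]
      rw [accT_append, zero_add]

theorem zipNodesLoop_eq (l : List (Int × Int × Int)) :
    ∀ (x y z : Int) (acc : List (Int × Int × Int)),
    zipNodesLoop l x y z acc = acc ++ accT (x, y, z) l := by
  induction l with
  | nil => intro x y z acc; simp [zipNodesLoop, accT]
  | cons t ts ih =>
    intro x y z acc
    obtain ⟨i, lo, la⟩ := t
    simp [zipNodesLoop, accT, ih, Prod.add_def]

-- ===== VERDICT (by name: the statement is the Claim_ definition above) =====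
theorem zip_nodes_spec : Claim_equal_zip_nodes := by
  intro ids lons lats _
  unfold Spec_zip_nodes zip_nodes zip_nodes_alt
  rw [zipNodesLoop_eq, dcScan_eq _ _ (le_refl _)]
  rfl
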